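-- pv_equiv track=rewrite | github.com/Saket8538/WebSentinel-AI-Agents-for-automated-web-testing | core/ultra_pdf_generator.py | _group_actions_by_priority
-- ===== SOURCE A (Python) =====
-- from typing import Dict, Any, List
--
-- def _group_actions_by_priority(actions: List[Dict[str, str]]) -> Dict[str, List[Dict[str, str]]]:
--     """Group actions into critical/high/medium buckets."""
--     grouped = {'critical': [], 'high': [], 'medium': []}
--     for action in actions:
--         sev = str(action.get('severity', 'MEDIUM')).upper()
--         if sev in ['CRITICAL', 'HIGH']:
--             target = 'critical' if sev == 'CRITICAL' else 'high'
--         else: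
--             target = 'medium'
--         grouped[target].append(action)
--     return grouped
-- ===== SOURCE B (Python) =====
-- from typing import Dict, Any, List
--
-- def _group_actions_by_priority(actions: List[Dict[str, str]]) -> Dict[str, List[Dict[str, str]]]:
--     """Group actions into critical/high/medium buckets (three filtered passes)."""
--     def sev(a):
--         return str(a.get('severity', 'MEDIUM')).upper()
--     return {
--         'critical': [a for a in actions if sev(a) == 'CRITICAL'],
--         'high': [a for a in actions if sev(a) == 'HIGH'],
--         'medium': [a for a in actions if sev(a) not in ('CRITICAL', 'HIGH')],
--     }
-- ===== Notes on version B (the rewrite author's own statement) =====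
-- stated objective: simpler
-- what changed: Replaces the single stateful bucketing loop (mutable dict of lists plus a computed target key) with three independent filtering comprehensions, one per severity bucket, assembled directly into the result dict.
import Mathlib
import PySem

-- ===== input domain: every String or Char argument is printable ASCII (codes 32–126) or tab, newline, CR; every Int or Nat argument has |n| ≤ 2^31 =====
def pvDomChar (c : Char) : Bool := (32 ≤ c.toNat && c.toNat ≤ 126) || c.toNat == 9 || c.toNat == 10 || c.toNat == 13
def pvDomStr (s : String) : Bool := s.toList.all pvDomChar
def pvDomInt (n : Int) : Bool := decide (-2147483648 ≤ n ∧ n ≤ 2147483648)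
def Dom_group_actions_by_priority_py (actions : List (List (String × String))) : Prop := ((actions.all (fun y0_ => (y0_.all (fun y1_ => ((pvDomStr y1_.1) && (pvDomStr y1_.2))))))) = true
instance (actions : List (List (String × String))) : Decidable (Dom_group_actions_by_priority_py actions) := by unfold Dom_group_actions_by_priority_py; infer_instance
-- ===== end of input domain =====

-- B changes the decomposition only: one stateful bucketing loop becomes three independent filters (objective: simpler).

-- ===== PORT A =====
-- the dict 'grouped' with its three fixed keys is carried as a triple (critical, high, medium)
def pvStepA (g : List (List (String × String)) × List (List (String × String)) × List (List (String × String)))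
    (action : List (String × String)) :
    List (List (String × String)) × List (List (String × String)) × List (List (String × String)) :=
  let sev := PySem.Str.upper (PySem.Dict.getD ⟨action⟩ "severity" "MEDIUM")
  if sev ∈ ["CRITICAL", "HIGH"] then
    if sev = "CRITICAL" then (g.1 ++ [action], g.2.1, g.2.2)
    else (g.1, g.2.1 ++ [action], g.2.2)
  else (g.1, g.2.1, g.2.2 ++ [action])

def group_actions_by_priority_py (actions : List (List (String × String))) : List (String × List (List (String × String))) :=
  let g := actions.foldl pvStepA ([], [], [])
  [("critical", g.1), ("high", g.2.1), ("medium", g.2.2)]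

-- ===== PORT B =====
def pvSevB (action : List (String × String)) : String :=
  PySem.Str.upper (PySem.Dict.getD ⟨action⟩ "severity" "MEDIUM")

def group_actions_by_priority_py_alt (actions : List (List (String × String))) : List (String × List (List (String × String))) :=
  [("critical", actions.filter (fun a => pvSevB a = "CRITICAL")),
   ("high", actions.filter (fun a => pvSevB a = "HIGH")),
   ("medium", actions.filter (fun a => pvSevB a ≠ "CRITICAL" ∧ pvSevB a ≠ "HIGH"))]

-- ===== PRECONDITION & SPEC =====
def Spec_group_actions_by_priority_py (actions : List (List (String × String))) (out : List (String × List (List (String × String)))) : Prop := out = group_actions_by_priority_py_alt actions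
instance (actions : List (List (String × String))) (out : List (String × List (List (String × String)))) : Decidable (Spec_group_actions_by_priority_py actions out) := by unfold Spec_group_actions_by_priority_py; infer_instance

-- ===== CLAIM (what is proved, stated in full; the proofs are below) =====
def Claim_equal_group_actions_by_priority_py : Prop := ∀ (actions : List (List (String × String))), Dom_group_actions_by_priority_py actions → Spec_group_actions_by_priority_py actions (group_actions_by_priority_py actions)

-- ===== LEMMAS AND PROOFS =====

theorem pvFoldA (actions : List (List (String × String)))
    (c h m : List (List (String × String))) :
    actions.foldl pvStepA (c, h, m) =
      (c ++ actions.filter (fun a => pvSevB a = "CRITICAL"),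
       h ++ actions.filter (fun a => pvSevB a = "HIGH"),
       m ++ actions.filter (fun a => pvSevB a ≠ "CRITICAL" ∧ pvSevB a ≠ "HIGH")) := by
  induction actions generalizing c h m with
  | nil => simp
  | cons a rest ih =>
    simp only [List.foldl_cons, List.filter_cons]
    by_cases hc : pvSevB a = "CRITICAL"
    · have : pvStepA (c, h, m) a = (c ++ [a], h, m) := by
        simp [pvStepA, pvSevB] at hc ⊢; simp [hc]
      rw [this, ih]; simp [hc]
    · by_cases hh : pvSevB a = "HIGH"
      · have : pvStepA (c, h, m) a = (c, h ++ [a], m) := by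
          simp [pvStepA, pvSevB] at hc hh ⊢; simp [hh]
        rw [this, ih]; simp [hh]
      · have : pvStepA (c, h, m) a = (c, h, m ++ [a]) := by
          simp [pvStepA, pvSevB] at hc hh ⊢; simp [hc, hh]
        rw [this, ih]; simp [hc, hh]

-- ===== VERDICT (by name: the statement is the Claim_ definition above) =====
theorem group_actions_by_priority_py_spec : Claim_equal_group_actions_by_priority_py := by
  intro actions _
  unfold Spec_group_actions_by_priority_py group_actions_by_priority_py group_actions_by_priority_py_alt
  rw [pvFoldA]
  simp
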